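-- pv_equiv track=rewrite | github.com/Dark-Elektron/cavsim2d | cavsim2d/utils/sensitivity.py | unique_rank
-- ===== SOURCE A (Python) =====
-- def unique_rank(a):
--     seen = {}
--     ranks = []
--     sorted_a = sorted(a)  # Sort the list for ranking
--
--     for idx, value in enumerate(a):
--         # Assign rank based on first occurrence in sorted list + number of previous occurrences in original list
--         if value not in seen:
--             seen[value] = sorted_a.index(value)
--
--         rank = seen[value] + list(a[:idx]).count(value)
--         ranks.append(rank)
--
--     return ranks
-- ===== SOURCE B (Python) =====
-- def unique_rank(a):
--     # inverse of the stable argsort: element i's rank is its position in the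
--     # order sorted by (value, original index)
--     order = sorted(range(len(a)), key=lambda i: (a[i], i))
--     ranks = [0] * len(a)
--     for pos, i in enumerate(order):
--         ranks[i] = pos
--     return ranks
-- ===== Notes on version B (the rewrite author's own statement) =====
-- stated objective: faster
-- what changed: B drops A's first-sorted-index dict and prefix-count scans entirely: it computes the stable argsort of the indices (sorted by (value, index)) and scatters each sorted position back to its original index, i.e. the rank list is the inverse permutation of the argsort.
import Mathlib
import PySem

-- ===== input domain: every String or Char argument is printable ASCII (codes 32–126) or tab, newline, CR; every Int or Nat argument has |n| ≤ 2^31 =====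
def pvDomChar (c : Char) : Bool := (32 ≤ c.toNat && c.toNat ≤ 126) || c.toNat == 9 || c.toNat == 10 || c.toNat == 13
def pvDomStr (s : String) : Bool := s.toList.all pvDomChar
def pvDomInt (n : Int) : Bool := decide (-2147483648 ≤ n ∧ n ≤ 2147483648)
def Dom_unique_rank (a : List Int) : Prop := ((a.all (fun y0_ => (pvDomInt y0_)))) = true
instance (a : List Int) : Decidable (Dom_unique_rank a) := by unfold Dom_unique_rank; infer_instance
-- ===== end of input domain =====

-- B replaces A's first-sorted-index + prefix-count scheme by the inverse permutation of the
-- stable argsort (indices sorted by (value, index), each sorted position scattered back);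
-- objective: faster.

-- ===== PORT A =====
-- sorted_a.index(value) always succeeds (value ∈ a, sorted_a a permutation of a), so `.getD 0` is exact.
def unique_rank (a : List Int) : List Int :=
  let sorted_a := PySem.List.sorted a (fun x => x) false
  ((PySem.List.enumerate a 0).foldl
    (fun (st : PySem.Dict Int Int × List Int) p =>
      let seen := if st.1.contains p.2 then st.1
        else st.1.insert p.2 (((PySem.List.index? sorted_a p.2).getD 0 : Nat) : Int)
      let rank := seen.getD p.2 0 +
        ((PySem.List.count (PySem.List.slice a none (some p.1)) p.2 : Nat) : Int)
      (seen, st.2 ++ [rank]))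
    (PySem.Dict.empty, [])).2

-- ===== PORT B =====
-- a[i] is read with i drawn from range(len(a)), always in range, so pyGetD's default is never used;
-- ranks[i] = pos writes an in-range index, so the total pySetD is exact.
def unique_rank_alt (a : List Int) : List Int :=
  let order := PySem.List.sorted2 (PySem.List.pyRange 0 (PySem.List.len a) 1)
      (fun i => PySem.List.pyGetD a i 0) (fun i => i) false
  (PySem.List.enumerate order 0).foldl
    (fun ranks p => PySem.List.pySetD ranks p.2 p.1)
    (PySem.List.pyRepeat [(0 : Int)] (PySem.List.len a))

-- ===== PRECONDITION & SPEC =====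
def Spec_unique_rank (a : List Int) (out : List Int) : Prop := out = unique_rank_alt a
instance (a : List Int) (out : List Int) : Decidable (Spec_unique_rank a out) := by unfold Spec_unique_rank; infer_instance

-- ===== CLAIM (what is proved, stated in full; the proofs are below) =====
def Claim_equal_unique_rank : Prop := ∀ (a : List Int), Dom_unique_rank a → Spec_unique_rank a (unique_rank a)

-- ===== LEMMAS AND PROOFS =====

-- ---------- A side: the loop computes first-sorted-index + prefix count ----------

-- first index of v in sa, as A uses it
def pvFi (sa : List Int) (v : Int) : Int := (((PySem.List.index? sa v).getD 0 : Nat) : Int)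

-- rank list of l given the already-processed prefix `pre`
def pvRanks (sa : List Int) : List Int → List Int → List Int
  | [], _ => []
  | v :: l, pre => (pvFi sa v + (pre.count v : Int)) :: pvRanks sa l (pre ++ [v])

-- A's loop computes pvRanks
theorem pvA_loop (a sa : List Int) :
    ∀ (l pre : List Int), pre ++ l = a →
    ∀ (seen : PySem.Dict Int Int) (ranks : List Int),
    (∀ k x, seen.get? k = some x → x = pvFi sa k) →
    ((PySem.List.enumerate l (pre.length : Int)).foldl
      (fun (st : PySem.Dict Int Int × List Int) p =>
        let seen := if st.1.contains p.2 then st.1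
          else st.1.insert p.2 (((PySem.List.index? sa p.2).getD 0 : Nat) : Int)
        let rank := seen.getD p.2 0 +
          ((PySem.List.count (PySem.List.slice a none (some p.1)) p.2 : Nat) : Int)
        (seen, st.2 ++ [rank]))
      (seen, ranks)).2 = ranks ++ pvRanks sa l pre := by
  intro l
  induction l with
  | nil => intro pre _ seen ranks _; simp [PySem.List.enumerate_nil, pvRanks]
  | cons v l ih =>
    intro pre ha seen ranks hinv
    rw [PySem.List.enumerate_cons, List.foldl_cons]
    have hslice : PySem.List.slice a none (some (pre.length : Int)) = pre := by
      rw [PySem.List.slice_to_natCast, ← ha, List.take_left]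
    set seen' := if seen.contains v then seen
      else seen.insert v (((PySem.List.index? sa v).getD 0 : Nat) : Int) with hseen'
    have hinv' : ∀ k x, seen'.get? k = some x → x = pvFi sa k := by
      intro k x hk
      rw [hseen'] at hk
      by_cases hc : seen.contains v
      · rw [if_pos hc] at hk; exact hinv k x hk
      · rw [if_neg hc] at hk
        by_cases hkv : k = v
        · subst hkv; rw [PySem.Dict.get?_insert_self] at hk
          injection hk with hk; rw [← hk]; rfl
        · rw [PySem.Dict.get?_insert_of_ne _ _ hkv] at hk; exact hinv k x hk
    have hgd : seen'.getD v 0 = pvFi sa v := by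
      rw [hseen']
      by_cases hc : seen.contains v
      · rw [if_pos hc]
        have : (seen.get? v).isSome := by rw [← PySem.Dict.contains_eq_isSome_get?]; exact hc
        cases hg : seen.get? v with
        | none => rw [hg] at this; simp at this
        | some w =>
          rw [PySem.Dict.getD_eq_get?_getD, hg]
          exact hinv v w hg
      · rw [if_neg hc, PySem.Dict.getD_insert_self]; rfl
    have hstep := ih (pre ++ [v]) (by simpa using ha) seen'
      (ranks ++ [seen'.getD v 0 + ((PySem.List.count pre v : Nat) : Int)]) hinv'
    simp only [List.length_append, List.length_singleton] at hstep
    have hcast : ((pre.length : Int) + 1) = (((pre.length + 1 : Nat)) : Int) := by push_cast; ring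
    rw [hslice, hcast, hstep, hgd, pvRanks]
    simp [PySem.List.count_eq]

theorem pvRanks_length (sa : List Int) : ∀ (l pre : List Int), (pvRanks sa l pre).length = l.length := by
  intro l
  induction l with
  | nil => intro pre; rfl
  | cons v l ih => intro pre; simp [pvRanks, ih]

theorem pvRanks_getElem? (sa : List Int) :
    ∀ (l pre : List Int) (i : Nat) (hi : i < l.length),
    (pvRanks sa l pre)[i]? = some (pvFi sa l[i] + ((pre ++ l.take i).count l[i] : Int)) := by
  intro l
  induction l with
  | nil => intro pre i hi; simp at hi
  | cons v l ih =>
    intro pre i hi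
    cases i with
    | zero => simp [pvRanks]
    | succ i =>
      have := ih (pre ++ [v]) i (by simpa using hi)
      simpa [pvRanks, List.take_succ_cons, List.append_assoc] using this

-- first index of v in a ≤-sorted list = number of strictly smaller elements
theorem index?_of_pairwise_le :
    ∀ (l : List Int), l.Pairwise (· ≤ ·) → ∀ v ∈ l,
      PySem.List.index? l v = some (l.countP (fun x => decide (x < v))) := by
  intro l
  induction l with
  | nil => intro _ v hv; simp at hv
  | cons x t ih =>
    intro hpw v hv
    rcases List.pairwise_cons.mp hpw with ⟨hx, ht⟩
    by_cases hxv : x = v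
    · subst hxv
      rw [PySem.List.index?_cons_self]
      have h0 : t.countP (fun y => decide (y < x)) = 0 := by
        rw [List.countP_eq_zero]
        intro y hy
        simpa using not_lt.mpr (hx y hy)
      simp [h0]
    · have hvt : v ∈ t := by
        rcases List.mem_cons.mp hv with h | h
        · exact absurd h.symm hxv
        · exact h
      rw [PySem.List.index?_cons_of_ne _ hxv, ih ht v hvt]
      have hxlt : x < v := lt_of_le_of_ne (hx v hvt) hxv
      simp [hxlt, Nat.add_comm]

-- hence pvFi over the sorted list counts strictly smaller elements of a
theorem pvFi_eq_countP (a : List Int) (v : Int) (hv : v ∈ a) :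
    pvFi (PySem.List.sorted a (fun x => x) false) v
      = ((a.countP (fun x => decide (x < v)) : Nat) : Int) := by
  have hperm := PySem.List.sorted_perm a (fun x => x) false
  have hpw : (PySem.List.sorted a (fun x => x) false).Pairwise (· ≤ ·) := by
    simpa using PySem.List.sorted_pairwise a (fun x => x)
  have hvs : v ∈ PySem.List.sorted a (fun x => x) false := (PySem.List.mem_sorted a (fun x => x) false v).mpr hv
  rw [pvFi, index?_of_pairwise_le _ hpw v hvs, hperm.countP_eq]
  rfl

-- ---------- B side: the sorted2 order is pairwise-strictly-increasing in pvBlt ----------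

-- the comparison sorted2 uses in B: lexicographic on (a[i], i)
def pvBlt (a : List Int) (i j : Int) : Bool :=
  decide (PySem.List.pyGetD a i 0 < PySem.List.pyGetD a j 0) ||
    (!decide (PySem.List.pyGetD a j 0 < PySem.List.pyGetD a i 0) && decide (i < j))

theorem pvBlt_trans (a : List Int) (x y z : Int) (h1 : pvBlt a x y = true)
    (h2 : pvBlt a y z = true) : pvBlt a x z = true := by
  simp only [pvBlt, Bool.or_eq_true, Bool.and_eq_true, Bool.not_eq_true',
    decide_eq_true_eq, decide_eq_false_iff_not] at h1 h2 ⊢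
  omega

theorem pvBlt_asymm (a : List Int) (x y : Int) (h : pvBlt a x y = true) :
    pvBlt a y x = false := by
  rw [← Bool.not_eq_true]
  simp only [pvBlt, Bool.or_eq_true, Bool.and_eq_true, Bool.not_eq_true',
    decide_eq_true_eq, decide_eq_false_iff_not, not_or, not_and, not_lt] at h ⊢
  omega

theorem pvBlt_conn (a : List Int) (x y : Int) (hne : y ≠ x) (h : pvBlt a x y = false) :
    pvBlt a y x = true := by
  rw [← Bool.not_eq_true] at h
  simp only [pvBlt, Bool.or_eq_true, Bool.and_eq_true, Bool.not_eq_true',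
    decide_eq_true_eq, decide_eq_false_iff_not, not_or, not_and, not_lt] at h ⊢
  have : x ≠ y := fun hxy => hne hxy.symm
  omega

-- inserting keeps strict sortedness when the new element is comparable with everything present
theorem pairwise_insertBy {α : Type} (before : α → α → Bool)
    (htrans : ∀ x y z, before x y = true → before y z = true → before x z = true)
    (x : α) : ∀ (ys : List α),
    ys.Pairwise (fun p q => before p q = true) →
    (∀ y ∈ ys, before x y = false → before y x = true) →
    (PySem.List.insertBy before x ys).Pairwise (fun p q => before p q = true) := by
  intro ys
  induction ys with
  | nil => intro _ _; simp [PySem.List.insertBy]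
  | cons y t ih =>
    intro hpw hconn
    rcases List.pairwise_cons.mp hpw with ⟨hy, ht⟩
    by_cases h : before x y = true
    · rw [show PySem.List.insertBy before x (y :: t) = x :: y :: t from by
        simp [PySem.List.insertBy, h]]
      refine List.pairwise_cons.mpr ⟨?_, hpw⟩
      intro z hz
      rcases List.mem_cons.mp hz with rfl | hz
      · exact h
      · exact htrans x y z h (hy z hz)
    · rw [show PySem.List.insertBy before x (y :: t) = y :: PySem.List.insertBy before x t from by
        simp [PySem.List.insertBy, h]]
      refine List.pairwise_cons.mpr ⟨?_, ?_⟩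
      · intro z hz
        rcases (PySem.List.mem_insertBy before x z t).mp hz with rfl | hz
        · exact hconn y (by simp) (by simpa using h)
        · exact hy z hz
      · exact ih ht (fun y hy hf => hconn y (by simp [hy]) hf)

-- the whole fold is pairwise-sorted when the input has no pvBlt-incomparable duplicates
theorem pairwise_insertBy_foldl {α : Type} (before : α → α → Bool)
    (htrans : ∀ x y z, before x y = true → before y z = true → before x z = true) :
    ∀ (xs acc : List α),
    acc.Pairwise (fun p q => before p q = true) →
    (∀ x ∈ xs, ∀ y, (y ∈ acc ∨ y ∈ xs) → y ≠ x → before x y = false → before y x = true) →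
    (∀ x ∈ xs, x ∉ acc) → xs.Nodup →
    (xs.foldl (fun ac x => PySem.List.insertBy before x ac) acc).Pairwise
      (fun p q => before p q = true) := by
  intro xs
  induction xs with
  | nil => intro acc h _ _ _; simpa using h
  | cons x t ih =>
    intro acc hacc hconn hdisj hnd
    rw [List.foldl_cons]
    rcases List.nodup_cons.mp hnd with ⟨hxt, hndt⟩
    have hxacc : x ∉ acc := hdisj x (by simp)
    refine ih (PySem.List.insertBy before x acc) ?_ ?_ ?_ hndt
    · refine pairwise_insertBy before htrans x acc hacc ?_
      intro y hy hf
      exact hconn x (by simp) y (Or.inl hy) (fun h => hxacc (h ▸ hy)) hf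
    · intro z hz y hy hne hf
      refine hconn z (by simp [hz]) y ?_ hne hf
      rcases hy with hy | hy
      · rcases (PySem.List.mem_insertBy before x y acc).mp hy with rfl | hy
        · exact Or.inr (by simp)
        · exact Or.inl hy
      · exact Or.inr (by simp [hy])
    · intro z hz hmem
      rcases (PySem.List.mem_insertBy before x z acc).mp hmem with rfl | hmem
      · exact hxt hz
      · exact hdisj z (by simp [hz]) hmem

-- B's order list: a permutation of range(n), pairwise strictly pvBlt-increasing
theorem pvOrder_pairwise (a : List Int) :
    (PySem.List.sorted2 (PySem.List.pyRange 0 (PySem.List.len a) 1)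
      (fun i => PySem.List.pyGetD a i 0) (fun i => i) false).Pairwise
      (fun p q => pvBlt a p q = true) := by
  have hnd : (PySem.List.pyRange 0 (PySem.List.len a) 1).Nodup :=
    PySem.List.nodup_pyRange_one 0 (PySem.List.len a)
  have := pairwise_insertBy_foldl (pvBlt a) (pvBlt_trans a)
    (PySem.List.pyRange 0 (PySem.List.len a) 1) [] (by simp)
    (fun x _ y _ hne hf => pvBlt_conn a x y hne hf)
    (fun x _ h => by simp at h) hnd
  simpa [PySem.List.sorted2, pvBlt] using this

-- position in a pairwise-strictly-sorted list = count of smaller elements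
theorem pos_eq_countP {α : Type} (before : α → α → Bool)
    (hasymm : ∀ x y, before x y = true → before y x = false)
    (hirr : ∀ x, before x x = false) :
    ∀ (ys : List α) (j : Nat) (hj : j < ys.length),
      ys.Pairwise (fun p q => before p q = true) →
      ys.countP (fun z => before z ys[j]) = j := by
  intro ys
  induction ys with
  | nil => intro j hj; simp at hj
  | cons y t ih =>
    intro j hj hpw
    rcases List.pairwise_cons.mp hpw with ⟨hy, ht⟩
    cases j with
    | zero =>
      have h0 : t.countP (fun z => before z y) = 0 := by
        rw [List.countP_eq_zero]
        intro z hz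
        simp [hasymm y z (hy z hz)]
      simp [hirr, h0]
    | succ j =>
      have hjt : j < t.length := by simpa using hj
      have hyi : before y t[j] = true := hy t[j] (List.getElem_mem hjt)
      simp only [List.getElem_cons_succ, List.countP_cons, ih j hjt ht, hyi]
      simp

-- scatter: indices not written stay as in acc
theorem scatter_untouched :
    ∀ (ys : List Int) (s : Int) (acc : List Int) (i : Nat),
      (∀ y ∈ ys, 0 ≤ y) → ((i : Int) ∉ ys) →
      ((PySem.List.enumerate ys s).foldl
        (fun r p => PySem.List.pySetD r p.2 p.1) acc)[i]? = acc[i]? := by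
  intro ys
  induction ys with
  | nil => intro s acc i _ _; simp [PySem.List.enumerate_nil]
  | cons y t ih =>
    intro s acc i hnn hni
    rw [PySem.List.enumerate_cons, List.foldl_cons]
    have hy0 : 0 ≤ y := hnn y (by simp)
    rw [ih (s + 1) _ i (fun y hy => hnn y (by simp [hy])) (fun h => hni (by simp [h]))]
    rw [PySem.List.pySetD_of_nonneg _ _ hy0]
    have hne : y.toNat ≠ i := by
      intro h
      apply hni
      simp [show y = (i : Int) by omega]
    rw [List.getElem?_set_ne hne]

-- scatter: the value written at index ys[j] is s + j
theorem scatter_getElem? :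
    ∀ (ys : List Int) (s : Int) (acc : List Int) (i j : Nat),
      (∀ y ∈ ys, 0 ≤ y ∧ y < acc.length) → ys.Nodup →
      (hj : j < ys.length) → ys[j] = (i : Int) →
      ((PySem.List.enumerate ys s).foldl
        (fun r p => PySem.List.pySetD r p.2 p.1) acc)[i]? = some (s + j) := by
  intro ys
  induction ys with
  | nil => intro s acc i j _ _ hj; simp at hj
  | cons y t ih =>
    intro s acc i j hb hnd hj hji
    rw [PySem.List.enumerate_cons, List.foldl_cons]
    rcases List.nodup_cons.mp hnd with ⟨hyt, hndt⟩
    have hy0 : 0 ≤ y := (hb y (by simp)).1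
    have hbt : ∀ z ∈ t, 0 ≤ z ∧ z < (PySem.List.pySetD acc y s).length := by
      intro z hz
      rw [PySem.List.length_pySetD]
      exact hb z (by simp [hz])
    cases j with
    | zero =>
      have hyi : y = (i : Int) := by simpa using hji
      have hnit : (i : Int) ∉ t := hyi ▸ hyt
      rw [scatter_untouched t (s + 1) _ i (fun z hz => (hbt z hz).1) hnit]
      rw [PySem.List.pySetD_of_nonneg _ _ hy0]
      have hlen : y.toNat < acc.length := by
        have := (hb y (by simp)).2; omega
      have : y.toNat = i := by omega
      rw [this] at hlen ⊢
      rw [List.getElem?_set_self hlen]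
      simp
    | succ j =>
      have hjt : j < t.length := by simpa using hj
      have hti : t[j] = (i : Int) := by simpa using hji
      have := ih (s + 1) (PySem.List.pySetD acc y s) i j hbt hndt hjt hti
      rw [this]
      congr 1
      push_cast
      ring

-- fold preserves the length
theorem scatter_length :
    ∀ (ys : List (Int × Int)) (acc : List Int),
      (ys.foldl (fun r p => PySem.List.pySetD r p.2 p.1) acc).length = acc.length := by
  intro ys
  induction ys with
  | nil => intro acc; rfl
  | cons y t ih => intro acc; rw [List.foldl_cons, ih, PySem.List.length_pySetD]

-- ---------- the counting identities ----------

-- counting over range(n) of a predicate on a[k] equals counting over a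
theorem countP_range_getD (l : List Int) (p : Int → Bool) :
    (List.range l.length).countP (fun k => p (l.getD k 0)) = l.countP p := by
  induction l using List.reverseRecOn with
  | nil => simp
  | append_singleton t x ih =>
    rw [List.length_append, List.length_singleton, List.range_succ, List.countP_append,
      List.countP_append]
    have h1 : (List.range t.length).countP (fun k => p ((t ++ [x]).getD k 0))
        = (List.range t.length).countP (fun k => p (t.getD k 0)) := by
      apply List.countP_congr
      intro k hk
      rw [List.mem_range] at hk
      simp [List.getD_eq_getElem?_getD, List.getElem?_append_left hk]
    rw [h1, ih]
    simp [List.getD_eq_getElem?_getD, List.countP_cons]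

-- disjoint split of the pvBlt count
theorem countP_split (l : List Nat) (p q : Nat → Bool) (hdisj : ∀ x ∈ l, p x = true → q x = false) :
    l.countP (fun x => p x || q x) = l.countP p + l.countP q := by
  induction l with
  | nil => rfl
  | cons x t ih =>
    simp only [List.countP_cons, ih (fun z hz => hdisj z (by simp [hz]))]
    by_cases hp : p x = true
    · have hq := hdisj x (by simp) hp
      simp [hp, hq]; omega
    · simp only [Bool.not_eq_true] at hp
      by_cases hq : q x = true <;> simp [hp, hq] <;> omega

-- ---------- assembly ----------

theorem unique_rank_eq_alt (a : List Int) : unique_rank a = unique_rank_alt a := by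
  classical
  set n := a.length with hn
  set sa := PySem.List.sorted a (fun x => x) false with hsa
  set order := PySem.List.sorted2 (PySem.List.pyRange 0 (PySem.List.len a) 1)
      (fun i => PySem.List.pyGetD a i 0) (fun i => i) false with horder
  -- A's value
  have hA : unique_rank a = pvRanks sa a [] := by
    have := pvA_loop a sa a [] rfl PySem.Dict.empty []
      (by intro k x h; rw [PySem.Dict.get?_empty] at h; cases h)
    simpa [unique_rank, hsa] using this
  -- facts about order
  have hperm : order.Perm (PySem.List.pyRange 0 (PySem.List.len a) 1) :=
    PySem.List.sorted2_perm _ _ _ _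
  have hpw : order.Pairwise (fun p q => pvBlt a p q = true) := pvOrder_pairwise a
  have hlenord : order.length = n := by
    rw [hperm.length_eq, PySem.List.length_pyRange_one]
    simp [PySem.List.len_eq, hn]
  have hmemord : ∀ z, z ∈ order ↔ (0 ≤ z ∧ z < (n : Int)) := by
    intro z
    rw [hperm.mem_iff, PySem.List.mem_pyRange_one]
    simp [PySem.List.len_eq, hn]
  have hndord : order.Nodup := hperm.nodup_iff.mpr (PySem.List.nodup_pyRange_one _ _)
  -- B's value, elementwise
  have hBlen : (unique_rank_alt a).length = n := by
    rw [unique_rank_alt]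
    simp only [← horder]
    rw [scatter_length, PySem.List.pyRepeat_singleton]
    simp [PySem.List.len_eq, hn]
  have hAlen : (unique_rank a).length = n := by
    rw [hA, pvRanks_length]
  apply List.ext_getElem (by rw [hAlen, hBlen])
  intro i h1 h2
  have hin : i < n := by rwa [hAlen] at h1
  -- A[i]
  have hAi : (unique_rank a)[i]? =
      some (((a.countP (fun x => decide (x < a[i]'hin)) : Nat) : Int)
        + (((a.take i).count (a[i]'hin) : Nat) : Int)) := by
    rw [hA, pvRanks_getElem? sa a [] i hin]
    rw [pvFi_eq_countP a _ (List.getElem_mem hin)]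
    simp
  -- B[i]: find the position of i in order
  have hiord : (i : Int) ∈ order := (hmemord _).mpr (by constructor <;> omega)
  obtain ⟨j, hj, hji⟩ := List.getElem_of_mem hiord
  have hBi : (unique_rank_alt a)[i]? = some ((0 : Int) + j) := by
    rw [unique_rank_alt]
    simp only [← horder]
    apply scatter_getElem? order 0 _ i j ?_ hndord hj hji
    intro y hy
    rcases (hmemord y).mp hy with ⟨h0, hlt⟩
    refine ⟨h0, ?_⟩
    rw [PySem.List.pyRepeat_singleton]
    simp only [List.length_replicate]
    have : ((PySem.List.len a).toNat) = n := by simp [PySem.List.len_eq, hn]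
    omega
  -- the position j equals A's rank
  have hcount : order.countP (fun z => pvBlt a z (i : Int)) = j := by
    have := pos_eq_countP (pvBlt a) (pvBlt_asymm a)
      (fun x => by simp [pvBlt]) order j hj hpw
    rwa [hji] at this
  -- transfer the count to range n and split it
  have hcount2 : order.countP (fun z => pvBlt a z (i : Int))
      = a.countP (fun x => decide (x < a[i]'hin)) + (a.take i).count (a[i]'hin) := by
    rw [hperm.countP_eq]
    have hrange : PySem.List.pyRange 0 (PySem.List.len a) 1
        = List.map (fun k : Nat => (k : Int)) (List.range n) := by
      rw [PySem.List.len_eq, ← hn, PySem.List.pyRange_zero_nat]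
    rw [hrange, List.countP_map]
    have hcongr : (List.range n).countP ((fun z => pvBlt a z (i : Int)) ∘ (fun k : Nat => (k : Int)))
        = (List.range n).countP (fun k =>
            (decide (a.getD k 0 < a.getD i 0) ||
              (decide (a.getD k 0 = a.getD i 0) && decide (k < i)))) := by
      apply List.countP_congr
      intro k hk
      rw [List.mem_range] at hk
      simp only [Function.comp, pvBlt]
      rw [PySem.List.pyGetD_natCast, PySem.List.pyGetD_natCast]
      simp only [Bool.or_eq_true, Bool.and_eq_true, Bool.not_eq_true', decide_eq_true_eq,
        decide_eq_false_iff_not, Bool.or_eq_true, Bool.and_eq_true, decide_eq_true_eq]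
      omega
    rw [hcongr]
    rw [countP_split _ _ _ ?_]
    · congr 1
      · have := countP_range_getD a (fun x => decide (x < a.getD i 0))
        rw [← hn] at this
        rw [this]
        congr 1
        funext x
        congr 1
        rw [List.getD_eq_getElem a 0 hin]
      · -- second summand: count of equal values among earlier indices
        have hsplit : List.range n = List.range i ++ (List.range (n - i)).map (fun k => i + k) := by
          rw [← List.range_add]
          congr 1
          omega
        rw [hsplit, List.countP_append]
        have hz : ((List.range (n - i)).map (fun k => i + k)).countP
            (fun k => decide (a.getD k 0 = a.getD i 0) && decide (k < i)) = 0 := by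
          rw [List.countP_eq_zero]
          intro k hk
          rcases List.mem_map.mp hk with ⟨m, _, rfl⟩
          simp
        rw [hz, Nat.add_zero]
        have htake : (a.take i).length = i := by
          rw [List.length_take]; omega
        have h1 : (List.range i).countP (fun k => decide (a.getD k 0 = a.getD i 0) && decide (k < i))
            = (List.range i).countP (fun k => decide ((a.take i).getD k 0 = (a[i]'hin))) := by
          apply List.countP_congr
          intro k hk
          rw [List.mem_range] at hk
          have e1 : (a.take i).getD k 0 = a.getD k 0 := by
            rw [List.getD_eq_getElem?_getD, List.getD_eq_getElem?_getD,
              List.getElem?_take_of_lt hk]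
          have e2 : a.getD i 0 = (a[i]'hin) := List.getD_eq_getElem a 0 hin
          have e3 : a[i]? = some (a[i]'hin) := List.getElem?_eq_getElem hin
          simp [hk, e1, e3]
        rw [h1]
        have h2' := countP_range_getD (a.take i) (fun x => decide (x = (a[i]'hin)))
        rw [htake] at h2'
        rw [h2', List.count_eq_countP]
        apply List.countP_congr
        intro x _
        simp
    · intro k hk hp
      rw [List.mem_range] at hk
      simp only [decide_eq_true_eq] at hp
      have hne : ¬ (a.getD k 0 = a.getD i 0) := by omega
      rw [List.getD_eq_getElem?_getD, List.getD_eq_getElem?_getD] at hne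
      simp [hne]
  rw [← Option.some_inj, ← List.getElem?_eq_getElem h1, ← List.getElem?_eq_getElem h2, hAi, hBi]
  have : (j : Int) = ((a.countP (fun x => decide (x < a[i]'hin)) : Nat) : Int)
      + (((a.take i).count (a[i]'hin) : Nat) : Int) := by
    rw [← hcount, hcount2]
    push_cast
    ring
  rw [this]
  ring_nf

-- ===== VERDICT (by name: the statement is the Claim_ definition above) =====
theorem unique_rank_spec : Claim_equal_unique_rank := by
  intro a _
  unfold Spec_unique_rank
  exact unique_rank_eq_alt a
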